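-- pv_equiv track=rewrite | github.com/20070125li-web/ecosort-14class-solo | streamlit_demo.py | _detect_model_type_from_state_dict
-- ===== SOURCE A (Python) =====
-- from typing import Dict, List, Optional, Tuple
--
-- def _detect_model_type_from_state_dict(state_dict: Dict) -> Tuple[str, str]:
--     """从 state_dict keys 自动检测模型类型
--
--     Args:
--         state_dict: 模型权重字典
--
--     Returns:
--         (model_type, backbone): 模型类型和骨架名称
--     """
--     keys = list(state_dict.keys())
--
--     # EfficientNet 特征: backbone._conv_stem, backbone._blocks
--     if any(k.startswith("backbone._conv_stem") for k in keys):
--         return "efficientnet", "efficientnet-b3"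
--
--     # EfficientNet 特征: backbone._blocks
--     if any(k.startswith("backbone._blocks") for k in keys):
--         return "efficientnet", "efficientnet-b3"
--
--     # ResNet 特征: features.0.weight 或 layer1.0.conv1.weight
--     if any(k.startswith("features.") or k.startswith("layer") for k in keys):
--         return "resnet", "resnet50"
--
--     # 默认尝试 EfficientNet (更常见)
--     return "efficientnet", "efficientnet-b3"
-- ===== SOURCE B (Python) =====
-- def _detect_model_type_from_state_dict(state_dict):
--     eff_found = False
--     resnet_found = False
--     for k in state_dict:
--         if k.startswith("backbone._conv_stem") or k.startswith("backbone._blocks"):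
--             eff_found = True
--         elif k.startswith("features.") or k.startswith("layer"):
--             resnet_found = True
--     if eff_found or not resnet_found:
--         return "efficientnet", "efficientnet-b3"
--     return "resnet", "resnet50"
-- ===== Notes on version B (the rewrite author's own statement) =====
-- stated objective: simpler
-- what changed: Replaced three separate short-circuiting any() scans over the key list with one single pass that collects two flags, making the efficientnet-over-resnet priority an explicit final decision instead of scan order.
import Mathlib
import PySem

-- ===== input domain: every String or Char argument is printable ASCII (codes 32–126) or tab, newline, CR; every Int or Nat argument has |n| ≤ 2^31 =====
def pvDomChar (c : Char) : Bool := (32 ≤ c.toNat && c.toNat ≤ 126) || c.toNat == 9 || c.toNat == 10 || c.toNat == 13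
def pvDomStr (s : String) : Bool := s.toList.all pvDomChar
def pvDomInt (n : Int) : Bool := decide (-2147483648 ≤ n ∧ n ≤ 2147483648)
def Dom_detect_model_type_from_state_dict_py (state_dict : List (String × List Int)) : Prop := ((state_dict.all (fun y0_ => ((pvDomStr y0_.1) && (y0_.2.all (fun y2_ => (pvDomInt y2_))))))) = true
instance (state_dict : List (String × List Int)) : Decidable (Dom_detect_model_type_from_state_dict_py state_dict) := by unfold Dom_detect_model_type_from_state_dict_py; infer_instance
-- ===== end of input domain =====

-- ===== PORT A =====
-- B changes: one flag-collecting pass instead of three any() scans; priority moved to the final decision (objective: simpler).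
def detect_model_type_from_state_dict_py (state_dict : List (String × List Int)) : String × String :=
  let keys := state_dict.map Prod.fst
  if keys.any (fun k => PySem.Str.startswith k "backbone._conv_stem") then
    ("efficientnet", "efficientnet-b3")
  else if keys.any (fun k => PySem.Str.startswith k "backbone._blocks") then
    ("efficientnet", "efficientnet-b3")
  else if keys.any (fun k => PySem.Str.startswith k "features." || PySem.Str.startswith k "layer") then
    ("resnet", "resnet50")
  else
    ("efficientnet", "efficientnet-b3")

-- ===== PORT B =====
def detect_model_type_from_state_dict_py_alt (state_dict : List (String × List Int)) : String × String :=
  let flags := state_dict.foldl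
    (fun (acc : Bool × Bool) kv =>
      if PySem.Str.startswith kv.1 "backbone._conv_stem" || PySem.Str.startswith kv.1 "backbone._blocks" then
        (true, acc.2)
      else if PySem.Str.startswith kv.1 "features." || PySem.Str.startswith kv.1 "layer" then
        (acc.1, true)
      else acc)
    (false, false)
  if flags.1 || !flags.2 then ("efficientnet", "efficientnet-b3")
  else ("resnet", "resnet50")

-- ===== PRECONDITION & SPEC =====
def Spec_detect_model_type_from_state_dict_py (state_dict : List (String × List Int)) (out : String × String) : Prop := out = detect_model_type_from_state_dict_py_alt state_dict
instance (state_dict : List (String × List Int)) (out : String × String) : Decidable (Spec_detect_model_type_from_state_dict_py state_dict out) := by unfold Spec_detect_model_type_from_state_dict_py; infer_instance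

-- ===== CLAIM (what is proved, stated in full; the proofs are below) =====
def Claim_equal_detect_model_type_from_state_dict_py : Prop := ∀ (state_dict : List (String × List Int)), Dom_detect_model_type_from_state_dict_py state_dict → Spec_detect_model_type_from_state_dict_py state_dict (detect_model_type_from_state_dict_py state_dict)

-- ===== LEMMAS AND PROOFS =====

lemma detect_flags_foldl {A : Type} (p r : A -> Bool) (l : List A) (a b : Bool) :
    l.foldl (fun (acc : Bool × Bool) x =>
        if p x then (true, acc.2) else if r x then (acc.1, true) else acc) (a, b)
    = (a || l.any p, b || l.any (fun x => !p x && r x)) := by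
  induction l generalizing a b with
  | nil => simp
  | cons hd tl ih =>
    simp only [List.foldl_cons, List.any_cons]
    by_cases h1 : p hd = true
    · simp [h1, ih]
    · by_cases h2 : r hd = true
      · simp [h1, h2, ih]
      · simp [h1, h2, ih]

lemma any_forall_false {A : Type} {p : A -> Bool} {l : List A} (h : l.any p = false) :
    ∀ x ∈ l, p x = false := by
  rw [List.any_eq_false] at h
  intro x hx; simpa using h x hx

lemma detect_abstract {A B : Type} (pc pb r : A -> Bool) (l : List A) (u v : B) :
    (if l.any pc then u else if l.any pb then u else if l.any r then v else u)
    = (let flags := l.foldl (fun (acc : Bool × Bool) x =>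
          if pc x || pb x then (true, acc.2) else if r x then (acc.1, true) else acc)
          (false, false)
       if flags.1 || !flags.2 then u else v) := by
  simp only [detect_flags_foldl, Bool.false_or]
  by_cases h1 : l.any (fun x => pc x || pb x) = true
  · by_cases hc : l.any pc = true
    · simp [hc, h1]
    · have hc' := any_forall_false (Bool.not_eq_true _ |>.mp hc)
      have hb : l.any pb = true := by
        simp only [List.any_eq_true] at h1 ⊢
        obtain ⟨x, hx, hp⟩ := h1
        simp only [Bool.or_eq_true] at hp
        exact ⟨x, hx, hp.resolve_left (by simp [hc' x hx])⟩
      simp [hc, hb, h1]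
  · have h1' := any_forall_false (Bool.not_eq_true _ |>.mp h1)
    have hc : l.any pc = false := by
      rw [List.any_eq_false]; intro x hx
      have := h1' x hx; simp only [Bool.or_eq_false_iff] at this
      simp [this.1]
    have hb : l.any pb = false := by
      rw [List.any_eq_false]; intro x hx
      have := h1' x hx; simp only [Bool.or_eq_false_iff] at this
      simp [this.2]
    have hr : l.any (fun x => !(pc x || pb x) && r x) = l.any r := by
      cases hq : l.any r with
      | false =>
        rw [List.any_eq_false] at hq ⊢
        intro x hx
        have := hq x hx
        simp only [Bool.not_eq_true] at this ⊢
        simp [this]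
      | true =>
        rw [List.any_eq_true] at hq ⊢
        obtain ⟨x, hx, hrx⟩ := hq
        exact ⟨x, hx, by simp [h1' x hx, hrx]⟩
    rw [hr]
    simp only [h1, hc, hb]
    by_cases hany : l.any r = true
    · simp [hany]
    · simp only [Bool.not_eq_true] at hany
      simp [hany]

-- ===== VERDICT (by name: the statement is the Claim_ definition above) =====
theorem detect_model_type_from_state_dict_py_spec : Claim_equal_detect_model_type_from_state_dict_py := by
  intro sd _
  unfold Spec_detect_model_type_from_state_dict_py
  show detect_model_type_from_state_dict_py sd = detect_model_type_from_state_dict_py_alt sd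
  unfold detect_model_type_from_state_dict_py detect_model_type_from_state_dict_py_alt
  have h := detect_abstract
      (fun kv : String × List Int => PySem.Str.startswith kv.1 "backbone._conv_stem")
      (fun kv : String × List Int => PySem.Str.startswith kv.1 "backbone._blocks")
      (fun kv : String × List Int => PySem.Str.startswith kv.1 "features." || PySem.Str.startswith kv.1 "layer")
      sd ("efficientnet", "efficientnet-b3") ("resnet", "resnet50")
  simp only [List.any_map] at h ⊢
  exact h
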